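-- pv_equiv track=rewrite | github.com/Illongated/Garden_Planer_pro | backend/irrigation_layout_engine.py | _recommend_pump
-- ===== SOURCE A (Python) =====
-- def _recommend_pump(required_flow_lph):
--     """Recommends a standard pump size."""
--     if required_flow_lph == 0:
--         return "Aucune"
--     pump_sizes = [500, 1000, 1500, 2000, 3000, 5000] # L/h
--     for size in pump_sizes:
--         if size >= required_flow_lph:
--             return f"{size} L/h"
--     return f"> {pump_sizes[-1]} L/h"
-- ===== SOURCE B (Python) =====
-- import bisect
--
--
-- def _recommend_pump(required_flow_lph):
--     """Recommends a standard pump size (binary search over the size table)."""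
--     if required_flow_lph == 0:
--         return "Aucune"
--     pump_sizes = [500, 1000, 1500, 2000, 3000, 5000]  # L/h
--     idx = bisect.bisect_left(pump_sizes, required_flow_lph)
--     if idx < len(pump_sizes):
--         return f"{pump_sizes[idx]} L/h"
--     return f"> {pump_sizes[-1]} L/h"
-- ===== Notes on version B (the rewrite author's own statement) =====
-- stated objective: idiomatic
-- what changed: The element-by-element linear scan for the first pump size >= the required flow is replaced by bisect.bisect_left (binary search) over the same sorted table, with an index bound check replacing the loop's fall-through.
import Mathlib
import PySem

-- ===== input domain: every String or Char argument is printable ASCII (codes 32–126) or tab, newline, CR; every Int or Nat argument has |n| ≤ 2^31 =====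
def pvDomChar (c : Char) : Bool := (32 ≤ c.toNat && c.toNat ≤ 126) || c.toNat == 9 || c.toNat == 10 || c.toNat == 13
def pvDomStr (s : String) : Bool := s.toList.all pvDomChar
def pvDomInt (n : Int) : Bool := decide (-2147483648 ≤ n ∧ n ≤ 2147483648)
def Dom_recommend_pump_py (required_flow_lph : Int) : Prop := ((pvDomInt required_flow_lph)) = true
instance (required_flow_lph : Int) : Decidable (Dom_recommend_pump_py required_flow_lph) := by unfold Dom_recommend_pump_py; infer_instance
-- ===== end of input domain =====

-- B replaces A's linear scan of the sorted size table by bisect.bisect_left (binary search); same return values.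

-- ===== PORT A =====
-- the 'for size in pump_sizes: if size >= required_flow_lph: return …' loop
def recommendLoopA : List Int → Int → Option String
  | [], _ => none
  | s :: rest, n => if s ≥ n then some (PySem.Int.toStr s ++ " L/h") else recommendLoopA rest n

def recommend_pump_py (required_flow_lph : Int) : String :=
  if required_flow_lph = 0 then "Aucune"
  else
    let pump_sizes : List Int := [500, 1000, 1500, 2000, 3000, 5000]
    match recommendLoopA pump_sizes required_flow_lph with
    | some s => s
    | none => "> " ++ PySem.Int.toStr ((PySem.List.pyGet? pump_sizes (-1)).getD 0) ++ " L/h"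

-- ===== PORT B =====
def recommend_pump_py_alt (required_flow_lph : Int) : String :=
  if required_flow_lph = 0 then "Aucune"
  else
    let pump_sizes : List Int := [500, 1000, 1500, 2000, 3000, 5000]
    let idx := PySem.List.bisectLeft pump_sizes required_flow_lph
    if idx < pump_sizes.length then PySem.Int.toStr (pump_sizes.getD idx 0) ++ " L/h"
    else "> " ++ PySem.Int.toStr ((PySem.List.pyGet? pump_sizes (-1)).getD 0) ++ " L/h"

-- ===== PRECONDITION & SPEC =====
def Spec_recommend_pump_py (required_flow_lph : Int) (out : String) : Prop := out = recommend_pump_py_alt required_flow_lph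
instance (required_flow_lph : Int) (out : String) : Decidable (Spec_recommend_pump_py required_flow_lph out) := by unfold Spec_recommend_pump_py; infer_instance

-- ===== CLAIM (what is proved, stated in full; the proofs are below) =====
def Claim_equal_recommend_pump_py : Prop := ∀ (required_flow_lph : Int), Dom_recommend_pump_py required_flow_lph → Spec_recommend_pump_py required_flow_lph (recommend_pump_py required_flow_lph)

-- ===== LEMMAS AND PROOFS =====

-- ===== VERDICT (by name: the statement is the Claim_ definition above) =====
theorem recommend_pump_py_spec : Claim_equal_recommend_pump_py := by
  intro n _
  unfold Spec_recommend_pump_py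
  by_cases h0 : n = 0
  · simp [recommend_pump_py, recommend_pump_py_alt, h0]
  rcases (by omega : n ≤ 500 ∨ (500 < n ∧ n ≤ 1000) ∨ (1000 < n ∧ n ≤ 1500) ∨ (1500 < n ∧ n ≤ 2000) ∨ (2000 < n ∧ n ≤ 3000) ∨ (3000 < n ∧ n ≤ 5000) ∨ 5000 < n) with h | ⟨h,h'⟩ | ⟨h,h'⟩ | ⟨h,h'⟩ | ⟨h,h'⟩ | ⟨h,h'⟩ | h
  · have hb : PySem.List.bisectLeft [500, 1000, 1500, 2000, 3000, 5000] n = 0 := by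
      simp [PySem.List.bisectLeft, PySem.List.bisectLeftLoop, show ¬((500:Int) < n) from by omega, show ¬((1000:Int) < n) from by omega, show ¬((2000:Int) < n) from by omega]
    simp [recommend_pump_py, recommend_pump_py_alt, recommendLoopA, h0, hb, show (500:Int) ≥ n from by omega]
  · have hb : PySem.List.bisectLeft [500, 1000, 1500, 2000, 3000, 5000] n = 1 := by
      simp [PySem.List.bisectLeft, PySem.List.bisectLeftLoop, show (500:Int) < n from by omega, show ¬((1000:Int) < n) from by omega, show ¬((2000:Int) < n) from by omega]
    simp [recommend_pump_py, recommend_pump_py_alt, recommendLoopA, h0, hb, show ¬((500:Int) ≥ n) from by omega, show (1000:Int) ≥ n from by omega]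
  · have hb : PySem.List.bisectLeft [500, 1000, 1500, 2000, 3000, 5000] n = 2 := by
      simp [PySem.List.bisectLeft, PySem.List.bisectLeftLoop, show (1000:Int) < n from by omega, show ¬((1500:Int) < n) from by omega, show ¬((2000:Int) < n) from by omega]
    simp [recommend_pump_py, recommend_pump_py_alt, recommendLoopA, h0, hb, show ¬((500:Int) ≥ n) from by omega, show ¬((1000:Int) ≥ n) from by omega, show (1500:Int) ≥ n from by omega]
  · have hb : PySem.List.bisectLeft [500, 1000, 1500, 2000, 3000, 5000] n = 3 := by
      simp [PySem.List.bisectLeft, PySem.List.bisectLeftLoop, show (1000:Int) < n from by omega, show (1500:Int) < n from by omega, show ¬((2000:Int) < n) from by omega]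
    simp [recommend_pump_py, recommend_pump_py_alt, recommendLoopA, h0, hb, show ¬((500:Int) ≥ n) from by omega, show ¬((1000:Int) ≥ n) from by omega, show ¬((1500:Int) ≥ n) from by omega, show (2000:Int) ≥ n from by omega]
  · have hb : PySem.List.bisectLeft [500, 1000, 1500, 2000, 3000, 5000] n = 4 := by
      simp [PySem.List.bisectLeft, PySem.List.bisectLeftLoop, show (2000:Int) < n from by omega, show ¬((3000:Int) < n) from by omega, show ¬((5000:Int) < n) from by omega]
    simp [recommend_pump_py, recommend_pump_py_alt, recommendLoopA, h0, hb, show ¬((500:Int) ≥ n) from by omega, show ¬((1000:Int) ≥ n) from by omega, show ¬((1500:Int) ≥ n) from by omega, show ¬((2000:Int) ≥ n) from by omega, show (3000:Int) ≥ n from by omega]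
  · have hb : PySem.List.bisectLeft [500, 1000, 1500, 2000, 3000, 5000] n = 5 := by
      simp [PySem.List.bisectLeft, PySem.List.bisectLeftLoop, show (2000:Int) < n from by omega, show (3000:Int) < n from by omega, show ¬((5000:Int) < n) from by omega]
    simp [recommend_pump_py, recommend_pump_py_alt, recommendLoopA, h0, hb, show ¬((500:Int) ≥ n) from by omega, show ¬((1000:Int) ≥ n) from by omega, show ¬((1500:Int) ≥ n) from by omega, show ¬((2000:Int) ≥ n) from by omega, show ¬((3000:Int) ≥ n) from by omega, show (5000:Int) ≥ n from by omega]
  · have hb : PySem.List.bisectLeft [500, 1000, 1500, 2000, 3000, 5000] n = 6 := by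
      simp [PySem.List.bisectLeft, PySem.List.bisectLeftLoop, show (2000:Int) < n from by omega, show (5000:Int) < n from by omega]
    simp [recommend_pump_py, recommend_pump_py_alt, recommendLoopA, h0, hb, show ¬((500:Int) ≥ n) from by omega, show ¬((1000:Int) ≥ n) from by omega, show ¬((1500:Int) ≥ n) from by omega, show ¬((2000:Int) ≥ n) from by omega, show ¬((3000:Int) ≥ n) from by omega, show ¬((5000:Int) ≥ n) from by omega]
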